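-- pv_equiv track=rewrite | github.com/Catttttttt/PracticeMakesPerfect | 2679.py | matrixSum
-- ===== SOURCE A (Python) =====
-- def matrixSum(nums):
--     """
--     :type nums: List[List[int]]
--     :rtype: int
--     """
--     res = 0
--     while nums:
--         m = 0
--         for i in nums:
--             if not i:
--                 return res
--             m = max(m,max(i))
--             i.remove(max(i))
--         res += m
-- ===== SOURCE B (Python) =====
-- # B: sort each row descending once, then sum the column-wise maxima (clamped at 0)
-- # in a single zip pass -- O(rows*cols*log cols) instead of A's O(rows*cols^2).
-- # Note: A mutates its argument (removes elements from the rows); B does not.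
-- def matrixSum(nums):
--     cols = zip(*(sorted(row, reverse=True) for row in nums))
--     return sum(max(0, *col) for col in cols)
-- ===== Notes on version B (the rewrite author's own statement) =====
-- stated objective: faster
-- what changed: Instead of repeatedly scanning every row for its max and removing it round by round (mutating the input), B sorts each row descending once and sums the per-column maxima (clamped at 0) over zip(*rows) in one pass.
-- outside the precondition, e.g. on matrixSum([]): A returns None, B returns 0
import Mathlib
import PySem

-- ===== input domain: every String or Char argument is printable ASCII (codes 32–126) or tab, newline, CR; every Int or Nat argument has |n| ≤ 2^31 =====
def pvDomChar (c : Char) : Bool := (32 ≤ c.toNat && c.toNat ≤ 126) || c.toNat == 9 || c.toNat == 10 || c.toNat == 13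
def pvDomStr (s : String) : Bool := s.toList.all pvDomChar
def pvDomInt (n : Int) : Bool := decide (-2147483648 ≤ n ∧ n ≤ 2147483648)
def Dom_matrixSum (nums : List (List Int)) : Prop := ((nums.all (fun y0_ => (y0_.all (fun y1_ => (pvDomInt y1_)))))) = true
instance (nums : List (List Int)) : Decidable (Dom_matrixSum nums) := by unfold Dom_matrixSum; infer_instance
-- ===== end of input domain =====

-- B sorts each row descending once and sums the per-column maxima (clamped at 0) in one
-- zip pass, instead of A's round-by-round scan-and-remove.  (A mutates its argument's
-- rows in place; the equivalence proved here is about the RETURN value only.)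

-- ===== PORT A =====
-- one round of A's inner 'for i in nums' loop: threads m, rebuilds the rows with the
-- max removed from each; none = the early 'return res' on an empty row
def pvRoundA : List (List Int) → Int → Option (Int × List (List Int))
  | [], m => some (m, [])
  | i :: rest, m =>
    match PySem.List.max? i (fun x => x) with
    | none => none                      -- 'if not i: return res'  (max? = none ↔ i = [])
    | some mx =>
      match pvRoundA rest (max m mx) with
      | none => none
      | some (m', rest') => some (m', ((PySem.List.remove? i mx).getD i) :: rest')

-- the 'while nums:' loop; fuel = total element count + 1 is enough, since every
-- completed round removes one element from every row
def pvLoopA : Nat → List (List Int) → Int → Int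
  | 0, _, res => res                    -- unreachable with the fuel chosen below
  | fuel + 1, nums, res =>
    if nums = [] then res               -- Python falls off the while and returns None (not an int): excluded by Pre_
    else
      match pvRoundA nums 0 with
      | none => res                     -- early 'return res'
      | some (m, nums') => pvLoopA fuel nums' (res + m)

def matrixSum (nums : List (List Int)) : Int :=
  pvLoopA ((nums.map (·.length)).sum + 1) nums 0

-- ===== PORT B =====
-- sorted(row, reverse=True)
def pvSortRow (r : List Int) : List Int := PySem.List.sorted r (fun x => x) true

-- total element count drops when every row loses its head (cited by decreasing_by below)
theorem pvTailSum_lt (rows : List (List Int)) (hne : rows ≠ []) (hall : ∀ r ∈ rows, r ≠ []) :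
    ((rows.map List.tail).map (·.length)).sum < (rows.map (·.length)).sum := by
  cases rows with
  | nil => exact absurd rfl hne
  | cons r rs =>
    have h1 : r.tail.length + 1 = r.length := by
      cases r with
      | nil => exact absurd rfl (hall [] (by simp))
      | cons a t => simp
    have h2 : ((rs.map List.tail).map (·.length)).sum ≤ (rs.map (·.length)).sum := by
      rw [List.map_map]
      apply List.sum_le_sum
      intro x hx
      simp only [Function.comp_apply]
      simp only [List.length_tail]
      omega
    simp only [List.map_cons, List.sum_cons, List.map_map] at *
    omega

-- zip(*rows): columns up to the shortest row
def pvZipCols (rows : List (List Int)) : List (List Int) :=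
  if rows = [] ∨ rows.any (·.isEmpty) then []
  else rows.map (·.headD 0) :: pvZipCols (rows.map List.tail)
termination_by (rows.map (·.length)).sum
decreasing_by
  rename_i h
  rw [not_or] at h
  have hnm : ([] : List Int) ∉ rows := by simpa using h.2
  simpa using pvTailSum_lt rows h.1 (fun r hr hc => hnm (hc ▸ hr))

-- sum(max(0, *col) for col in zip(*(sorted(row, reverse=True) for row in nums)))
def matrixSum_alt (nums : List (List Int)) : Int :=
  ((pvZipCols (nums.map pvSortRow)).map (fun col => col.foldl max 0)).sum

-- ===== PRECONDITION & SPEC =====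
-- Pre_ excludes only nums = [], on which the Python A falls off the while loop and
-- returns None, not an int.
def Pre_matrixSum (nums : List (List Int)) : Prop := nums ≠ []
instance (nums : List (List Int)) : Decidable (Pre_matrixSum nums) := by unfold Pre_matrixSum; infer_instance
def pvWitness_matrixSum : List (List Int) := [[1, 2], [3, -4]]

def Spec_matrixSum (nums : List (List Int)) (out : Int) : Prop := out = matrixSum_alt nums
instance (nums : List (List Int)) (out : Int) : Decidable (Spec_matrixSum nums out) := by unfold Spec_matrixSum; infer_instance

-- ===== CLAIM (what is proved, stated in full; the proofs are below) =====
def Claim_equal_matrixSum : Prop := ∀ (nums : List (List Int)), Dom_matrixSum nums → Pre_matrixSum nums → Spec_matrixSum nums (matrixSum nums)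

-- ===== LEMMAS AND PROOFS =====

-- max of a nonempty row, as A computes it
def pvMaxOf (i : List Int) : Int := (PySem.List.max? i (fun x => x)).getD 0

theorem pvMaxOf_mem {i : List Int} (h : i ≠ []) : pvMaxOf i ∈ i := by
  cases hm : PySem.List.max? i (fun x => x) with
  | none => exact absurd ((PySem.List.max?_eq_none_iff i (fun x => x)).mp hm) h
  | some m =>
    have := PySem.List.max?_mem hm
    simpa [pvMaxOf, hm] using this

theorem pvMaxOf_isMax {i : List Int} (h : i ≠ []) : ∀ y ∈ i, y ≤ pvMaxOf i := by
  cases hm : PySem.List.max? i (fun x => x) with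
  | none => exact absurd ((PySem.List.max?_eq_none_iff i (fun x => x)).mp hm) h
  | some m =>
    intro y hy
    have := PySem.List.max?_isMax hm y hy
    simpa [pvMaxOf, hm] using this

-- descending sort peels off the maximum
theorem pvSortRow_decomp {i : List Int} (h : i ≠ []) :
    pvSortRow i = pvMaxOf i :: pvSortRow (i.erase (pvMaxOf i)) := by
  have hperm : (pvSortRow i).Perm (pvMaxOf i :: pvSortRow (i.erase (pvMaxOf i))) :=
    (PySem.List.sorted_perm i (fun x => x) true).trans
      ((List.perm_cons_erase (pvMaxOf_mem h)).trans
        (List.Perm.cons _ (PySem.List.sorted_perm _ (fun x => x) true).symm))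
  refine hperm.eq_of_pairwise (fun a b _ _ hab hba => le_antisymm hba hab) ?_ ?_
  · exact PySem.List.sorted_pairwise_rev i (fun x => x)
  · constructor
    · intro b hb
      have hb' : b ∈ i.erase (pvMaxOf i) :=
        (PySem.List.mem_sorted (i.erase (pvMaxOf i)) (fun x => x) true b).mp hb
      exact pvMaxOf_isMax h b (List.mem_of_mem_erase hb')
    · exact PySem.List.sorted_pairwise_rev _ (fun x => x)

-- pvRoundA on rows that contain an empty row: the early return
theorem pvRoundA_none {rows : List (List Int)} (m : Int)
    (h : ∃ i ∈ rows, i = []) : pvRoundA rows m = none := by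
  induction rows generalizing m with
  | nil => simp at h
  | cons i rest ih =>
    obtain ⟨j, hj, hje⟩ := h
    by_cases hi : i = []
    · subst hi
      have : PySem.List.max? ([] : List Int) (fun x => x) = none := by
        simp [PySem.List.max?_eq_none_iff]
      simp [pvRoundA, this]
    · have hmem : j ∈ rest := by
        cases List.mem_cons.mp hj with
        | inl he => exact absurd (he ▸ hje) hi
        | inr hr => exact hr
      cases hm : PySem.List.max? i (fun x => x) with
      | none => simp [pvRoundA, hm]
      | some mx => simp [pvRoundA, hm, ih _ ⟨j, hmem, hje⟩]

-- pvRoundA on rows that are all nonempty: one element removed per row, running max threaded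
theorem pvRoundA_some {rows : List (List Int)} (m : Int)
    (h : ∀ i ∈ rows, i ≠ []) :
    pvRoundA rows m = some (rows.foldl (fun acc i => max acc (pvMaxOf i)) m,
                            rows.map (fun i => i.erase (pvMaxOf i))) := by
  induction rows generalizing m with
  | nil => simp [pvRoundA]
  | cons i rest ih =>
    have hi : i ≠ [] := h i (by simp)
    cases hm : PySem.List.max? i (fun x => x) with
    | none => exact absurd ((PySem.List.max?_eq_none_iff i (fun x => x)).mp hm) hi
    | some mx =>
      have hmx : pvMaxOf i = mx := by simp [pvMaxOf, hm]
      have hrem : PySem.List.remove? i mx = some (i.erase mx) :=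
        PySem.List.remove?_eq_some_erase i mx (hmx ▸ pvMaxOf_mem hi)
      simp [pvRoundA, hm, ih _ (fun j hj => h j (by simp [hj])), hmx, hrem]

-- removing one element per row lowers the total element count by the number of rows
theorem pvSum_erase (rows : List (List Int)) (h : ∀ i ∈ rows, i ≠ []) :
    ((rows.map (fun i => i.erase (pvMaxOf i))).map (·.length)).sum + rows.length
      = (rows.map (·.length)).sum := by
  induction rows with
  | nil => simp
  | cons i rest ih =>
    have h1 : (i.erase (pvMaxOf i)).length + 1 = i.length :=
      List.length_erase_add_one (pvMaxOf_mem (h i (by simp)))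
    have h2 := ih (fun j hj => h j (by simp [hj]))
    simp only [List.map_cons, List.sum_cons, List.length_cons]
    omega

-- the connecting invariant: the loop adds exactly the column sum of the sorted rows
theorem pvLoop_eq (fuel : Nat) :
    ∀ (rows : List (List Int)) (res : Int), rows ≠ [] →
      (rows.map (·.length)).sum < fuel →
      pvLoopA fuel rows res =
        res + ((pvZipCols (rows.map pvSortRow)).map (fun col => col.foldl max 0)).sum := by
  induction fuel with
  | zero => intro rows res _ hlt; omega
  | succ fuel ih =>
    intro rows res hne hlt
    by_cases hemp : ∃ i ∈ rows, i = []
    · -- some row is empty: both sides are res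
      have hz : pvZipCols (rows.map pvSortRow) = [] := by
        rw [pvZipCols.eq_def]
        have : (rows.map pvSortRow).any (·.isEmpty) = true := by
          obtain ⟨j, hj, hje⟩ := hemp
          refine List.any_eq_true.mpr ⟨pvSortRow j, List.mem_map_of_mem hj, ?_⟩
          simp [hje, pvSortRow, PySem.List.sorted_eq_nil_iff]
        simp [this]
      simp [pvLoopA, hne, pvRoundA_none 0 hemp, hz]
    · have hall : ∀ i ∈ rows, i ≠ [] := by
        intro i hi hie
        exact hemp ⟨i, hi, hie⟩
      set rows' := rows.map (fun i => i.erase (pvMaxOf i)) with hrows'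
      have hsum' := pvSum_erase rows hall
      rw [← hrows'] at hsum'
      have hlen : 0 < rows.length := List.length_pos_iff.mpr hne
      -- one column of pvZipCols
      have hcols : pvZipCols (rows.map pvSortRow) =
          ((rows.map pvSortRow).map (·.headD 0)) :: pvZipCols (rows'.map pvSortRow) := by
        rw [pvZipCols.eq_def]
        have h1 : ¬ (rows.map pvSortRow = [] ∨ (rows.map pvSortRow).any (·.isEmpty)) := by
          rintro (he | ha)
          · exact hne (by simpa using he)
          · obtain ⟨x, hx, hxe⟩ := List.any_eq_true.mp ha
            obtain ⟨j, hj, rfl⟩ := List.mem_map.mp hx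
            exact hall j hj (by simpa [pvSortRow, PySem.List.sorted_eq_nil_iff] using hxe)
        rw [if_neg h1]
        congr 1
        rw [List.map_map, hrows', List.map_map]
        apply congrArg
        apply List.map_congr_left
        intro j hj
        simp only [Function.comp_apply]
        rw [pvSortRow_decomp (hall j hj)]
        simp
      have hheads : ((rows.map pvSortRow).map (·.headD 0)) = rows.map pvMaxOf := by
        rw [List.map_map]
        apply List.map_congr_left
        intro j hj
        simp only [Function.comp_apply]
        rw [pvSortRow_decomp (hall j hj)]
        simp
      have hm : (rows.map pvMaxOf).foldl max 0 =
          rows.foldl (fun acc i => max acc (pvMaxOf i)) 0 := by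
        rw [List.foldl_map]
      -- unfold one loop iteration
      rw [pvLoopA]
      simp only [if_neg hne]
      rw [pvRoundA_some 0 hall]
      simp only
      rw [ih rows' (res + rows.foldl (fun acc i => max acc (pvMaxOf i)) 0)
            (by simp [hrows', hne]) (by omega)]
      rw [hcols, hheads]
      simp only [List.map_cons, List.sum_cons, hm]
      ring

-- ===== VERDICT (by name: the statement is the Claim_ definition above) =====
theorem matrixSum_spec : Claim_equal_matrixSum := by
  intro nums _ hpre
  unfold Spec_matrixSum matrixSum matrixSum_alt
  rw [pvLoop_eq _ nums 0 hpre (by omega)]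
  ring
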